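-- pv_equiv track=rewrite | github.com/cooperxxjohn-svg/xboq | src/bench/annotation.py | normalize_room_label
-- ===== SOURCE A (Python) =====
-- INDIA_ROOM_ALIASES = {
--     "Toilet": ["WC", "W.C.", "Bath", "Bathroom", "T&B", "OTS", "Attached Bath", "Common Bath"],
--     "Bedroom": ["Bed", "Bed Room", "BR", "Master Bed", "MBR", "Guest Room"],
--     "Living": ["Living Room", "Drawing", "Drawing Room", "Hall", "Lounge"],
--     "Kitchen": ["Kit", "Pantry", "Modular Kitchen", "Open Kitchen"],
--     "Dining": ["Dining Room", "Dining Hall"],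
--     "Balcony": ["Bal", "Verandah", "Sit Out", "Sitout", "Terrace"],
--     "Pooja": ["Puja", "Prayer", "Prayer Room", "Mandir"],
--     "Utility": ["Utility Room", "Servant", "Maid", "Service"],
--     "Store": ["Storage", "Store Room", "Lumber"],
--     "Passage": ["Lobby", "Corridor", "Foyer", "Entrance"],
--     "Dressing": ["Dress", "Wardrobe", "Walk-in Closet"],
--     "Study": ["Office", "Home Office", "Library", "Work Room"],
-- }
--
-- def normalize_room_label(label: str) -> str:
--     """Normalize room label to canonical form using India aliases."""
--     label_lower = label.lower().strip()
--
--     for canonical, aliases in INDIA_ROOM_ALIASES.items():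
--         if label_lower == canonical.lower():
--             return canonical
--         for alias in aliases:
--             if label_lower == alias.lower():
--                 return canonical
--
--     # Return title case of original if no match
--     return label.title()
-- ===== SOURCE B (Python) =====
-- INDIA_ROOM_ALIASES = {
--     "Toilet": ["WC", "W.C.", "Bath", "Bathroom", "T&B", "OTS", "Attached Bath", "Common Bath"],
--     "Bedroom": ["Bed", "Bed Room", "BR", "Master Bed", "MBR", "Guest Room"],
--     "Living": ["Living Room", "Drawing", "Drawing Room", "Hall", "Lounge"],
--     "Kitchen": ["Kit", "Pantry", "Modular Kitchen", "Open Kitchen"],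
--     "Dining": ["Dining Room", "Dining Hall"],
--     "Balcony": ["Bal", "Verandah", "Sit Out", "Sitout", "Terrace"],
--     "Pooja": ["Puja", "Prayer", "Prayer Room", "Mandir"],
--     "Utility": ["Utility Room", "Servant", "Maid", "Service"],
--     "Store": ["Storage", "Store Room", "Lumber"],
--     "Passage": ["Lobby", "Corridor", "Foyer", "Entrance"],
--     "Dressing": ["Dress", "Wardrobe", "Walk-in Closet"],
--     "Study": ["Office", "Home Office", "Library", "Work Room"],
-- }
--
-- # Flatten the alias table once into (lowercased name, canonical) pairs, sort it by
-- # name, and answer each query by hand-rolled binary search over the sorted table.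
-- _PAIRS = []
-- for _canonical, _aliases in INDIA_ROOM_ALIASES.items():
--     for _name in [_canonical] + _aliases:
--         _PAIRS.append((_name.lower(), _canonical))
-- _TABLE = sorted(_PAIRS, key=lambda p: p[0])
--
--
-- def _lookup(key):
--     """Binary search for key in the sorted table; canonical name or None."""
--     lo, hi = 0, len(_TABLE)
--     while lo < hi:
--         mid = (lo + hi) // 2
--         if _TABLE[mid][0] < key:
--             lo = mid + 1
--         else:
--             hi = mid
--     if lo < len(_TABLE) and _TABLE[lo][0] == key:
--         return _TABLE[lo][1]
--     return None
--
--
-- def normalize_room_label(label: str) -> str: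
--     """Normalize room label to canonical form using India aliases."""
--     hit = _lookup(label.lower().strip())
--     return hit if hit is not None else label.title()
-- ===== Notes on version B (the rewrite author's own statement) =====
-- stated objective: alternative
-- what changed: Replaces A's per-call nested scan over the alias dict with a flat (lowercased name, canonical) table built and sorted once at module level, queried by a hand-rolled binary search with a title-case fallback.
import Mathlib
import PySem

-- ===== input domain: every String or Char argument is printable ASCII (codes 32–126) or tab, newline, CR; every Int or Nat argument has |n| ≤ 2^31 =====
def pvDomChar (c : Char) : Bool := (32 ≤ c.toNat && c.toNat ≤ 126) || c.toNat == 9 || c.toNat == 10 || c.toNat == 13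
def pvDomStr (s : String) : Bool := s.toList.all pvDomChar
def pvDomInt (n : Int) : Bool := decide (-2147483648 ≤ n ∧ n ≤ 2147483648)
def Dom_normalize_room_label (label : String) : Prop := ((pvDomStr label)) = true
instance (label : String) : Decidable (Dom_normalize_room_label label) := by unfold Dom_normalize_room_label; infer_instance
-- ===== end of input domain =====

-- B replaces A's per-call nested scan over the alias dict with a flat table of
-- (lowercased name, canonical) pairs built and sorted once, queried by binary search.

-- Shared module constant INDIA_ROOM_ALIASES (a dict of str -> list[str], as an assoc list).
def indiaRoomAliases : List (String × List String) :=
  [ ("Toilet", ["WC", "W.C.", "Bath", "Bathroom", "T&B", "OTS", "Attached Bath", "Common Bath"]),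
    ("Bedroom", ["Bed", "Bed Room", "BR", "Master Bed", "MBR", "Guest Room"]),
    ("Living", ["Living Room", "Drawing", "Drawing Room", "Hall", "Lounge"]),
    ("Kitchen", ["Kit", "Pantry", "Modular Kitchen", "Open Kitchen"]),
    ("Dining", ["Dining Room", "Dining Hall"]),
    ("Balcony", ["Bal", "Verandah", "Sit Out", "Sitout", "Terrace"]),
    ("Pooja", ["Puja", "Prayer", "Prayer Room", "Mandir"]),
    ("Utility", ["Utility Room", "Servant", "Maid", "Service"]),
    ("Store", ["Storage", "Store Room", "Lumber"]),
    ("Passage", ["Lobby", "Corridor", "Foyer", "Entrance"]),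
    ("Dressing", ["Dress", "Wardrobe", "Walk-in Closet"]),
    ("Study", ["Office", "Home Office", "Library", "Work Room"]) ]

-- str.title(), ported by hand (PySem has no title): a letter is uppercased when the
-- previous character is not a letter, lowercased otherwise; exact on ASCII.
def pyTitleChars : List Char → Bool → List Char
  | [], _ => []
  | c :: rest, prevAlpha =>
      (if PySem.Chars.isalpha c then
        (if prevAlpha then PySem.Chars.lowerChar c else PySem.Chars.upperChar c)
      else c) :: pyTitleChars rest (PySem.Chars.isalpha c)

def pyTitle (s : String) : String := String.ofList (pyTitleChars s.toList false)

-- ===== PORT A =====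
-- inner 'for alias in aliases: if label_lower == alias.lower(): return canonical'
def scanAliasesA (aliases : List String) (low canonical : String) : Option String :=
  match aliases with
  | [] => none
  | a :: rest =>
      if low = PySem.Str.lower a then some canonical else scanAliasesA rest low canonical

-- outer 'for canonical, aliases in INDIA_ROOM_ALIASES.items(): …'
def scanTableA (table : List (String × List String)) (low : String) : Option String :=
  match table with
  | [] => none
  | (canonical, aliases) :: rest =>
      if low = PySem.Str.lower canonical then some canonical
      else
        match scanAliasesA aliases low canonical with
        | some r => some r
        | none => scanTableA rest low

def normalize_room_label (label : String) : String :=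
  let labelLower := PySem.Str.strip (PySem.Str.lower label)
  match scanTableA indiaRoomAliases labelLower with
  | some r => r
  | none => pyTitle label

-- ===== PORT B =====
-- module-level build: _PAIRS appends (name.lower(), canonical) for canonical and each alias
def flatPairs : List (String × String) :=
  indiaRoomAliases.foldl
    (fun acc p => (p.1 :: p.2).foldl (fun acc name => acc ++ [(PySem.Str.lower name, p.1)]) acc)
    []

-- _TABLE = sorted(_PAIRS, key=lambda p: p[0])
def tableB : List (String × String) := PySem.List.sorted flatPairs (fun p => p.1) false

-- hand port of Python's '<' on str: lexicographic by code point (exact on all strings)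
def strLtB : List Char → List Char → Bool
  | [], [] => false
  | [], _ :: _ => true
  | _ :: _, [] => false
  | x :: xs, y :: ys =>
      if x.toNat < y.toNat then true
      else if y.toNat < x.toNat then false
      else strLtB xs ys

-- the 'while lo < hi' bisection loop; fuel = |T| bounds the iteration count (the
-- interval [lo, hi) shrinks every step).  T[mid]'s pyGet? default is unreachable
-- (mid always lies in [lo, hi) ⊆ [0, |T|)).
def bsLoop (T : List (String × String)) (key : List Char) : Nat → Int → Int → Int
  | 0, lo, _ => lo
  | fuel + 1, lo, hi =>
      if lo < hi then
        let mid := PySem.Int.floordiv (lo + hi) 2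
        if strLtB (((PySem.List.pyGet? T mid).getD ("", "")).1.toList) key then
          bsLoop T key fuel (mid + 1) hi
        else
          bsLoop T key fuel lo mid
      else lo

-- _lookup(key): binary search, then 'if lo < len(T) and T[lo][0] == key'
def lookupIn (T : List (String × String)) (key : String) : Option String :=
  let lo := bsLoop T key.toList T.length 0 (T.length : Int)
  if lo < (T.length : Int) then
    match PySem.List.pyGet? T lo with
    | some p => if p.1 = key then some p.2 else none
    | none => none   -- IndexError branch, unreachable: lo stays in [0, |T|]
  else none

def normalize_room_label_alt (label : String) : String :=
  match lookupIn tableB (PySem.Str.strip (PySem.Str.lower label)) with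
  | some hit => hit
  | none => pyTitle label

-- ===== PRECONDITION & SPEC =====
def Spec_normalize_room_label (label : String) (out : String) : Prop := out = normalize_room_label_alt label
instance (label : String) (out : String) : Decidable (Spec_normalize_room_label label out) := by unfold Spec_normalize_room_label; infer_instance

-- ===== CLAIM (what is proved, stated in full; the proofs are below) =====
def Claim_equal_normalize_room_label : Prop := ∀ (label : String), Dom_normalize_room_label label → Spec_normalize_room_label label (normalize_room_label label)

-- ===== LEMMAS AND PROOFS =====

def tableLit : List (String × String) :=
  [ ("attached bath", "Toilet"),
    ("bal", "Balcony"),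
    ("balcony", "Balcony"),
    ("bath", "Toilet"),
    ("bathroom", "Toilet"),
    ("bed", "Bedroom"),
    ("bed room", "Bedroom"),
    ("bedroom", "Bedroom"),
    ("br", "Bedroom"),
    ("common bath", "Toilet"),
    ("corridor", "Passage"),
    ("dining", "Dining"),
    ("dining hall", "Dining"),
    ("dining room", "Dining"),
    ("drawing", "Living"),
    ("drawing room", "Living"),
    ("dress", "Dressing"),
    ("dressing", "Dressing"),
    ("entrance", "Passage"),
    ("foyer", "Passage"),
    ("guest room", "Bedroom"),
    ("hall", "Living"),
    ("home office", "Study"),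
    ("kit", "Kitchen"),
    ("kitchen", "Kitchen"),
    ("library", "Study"),
    ("living", "Living"),
    ("living room", "Living"),
    ("lobby", "Passage"),
    ("lounge", "Living"),
    ("lumber", "Store"),
    ("maid", "Utility"),
    ("mandir", "Pooja"),
    ("master bed", "Bedroom"),
    ("mbr", "Bedroom"),
    ("modular kitchen", "Kitchen"),
    ("office", "Study"),
    ("open kitchen", "Kitchen"),
    ("ots", "Toilet"),
    ("pantry", "Kitchen"),
    ("passage", "Passage"),
    ("pooja", "Pooja"),
    ("prayer", "Pooja"),
    ("prayer room", "Pooja"),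
    ("puja", "Pooja"),
    ("servant", "Utility"),
    ("service", "Utility"),
    ("sit out", "Balcony"),
    ("sitout", "Balcony"),
    ("storage", "Store"),
    ("store", "Store"),
    ("store room", "Store"),
    ("study", "Study"),
    ("t&b", "Toilet"),
    ("terrace", "Balcony"),
    ("toilet", "Toilet"),
    ("utility", "Utility"),
    ("utility room", "Utility"),
    ("verandah", "Balcony"),
    ("w.c.", "Toilet"),
    ("walk-in closet", "Dressing"),
    ("wardrobe", "Dressing"),
    ("wc", "Toilet"),
    ("work room", "Study") ]

def keyLits : List String :=
  [ "attached bath", "bal", "balcony", "bath", "bathroom", "bed", "bed room", "bedroom", "br", "common bath", "corridor", "dining", "dining hall", "dining room", "drawing", "drawing room", "dress", "dressing", "entrance", "foyer", "guest room", "hall", "home office", "kit", "kitchen", "library", "living", "living room", "lobby", "lounge", "lumber", "maid", "mandir", "master bed", "mbr", "modular kitchen", "office", "open kitchen", "ots", "pantry", "passage", "pooja", "prayer", "prayer room", "puja", "servant", "service", "sit out", "sitout", "storage", "store", "store room", "study", "t&b", "terrace", "toilet", "utility", "utility room", "verandah", "w.c.", "walk-in closet", "wardrobe", "wc", "work room"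 ]

-- sorted(_PAIRS, key=p[0]) is the literal table: a strictly key-increasing permutation
theorem tableB_eq : tableB = tableLit := by
  haveI : IsTrans (String × String) (fun a b => a.1 < b.1) := ⟨fun _ _ _ => lt_trans⟩
  apply PySem.List.sorted_eq_of_perm_of_pairwise_lt
  · decide
  · apply List.IsChain.pairwise
    simp only [tableLit, List.isChain_cons_cons, List.isChain_singleton, and_true]
    repeat' apply And.intro
    all_goals exact compare_lt_iff_lt.mp rfl

theorem scanAliasesA_eq_none (aliases : List String) (low canonical : String)
    (h : ∀ a ∈ aliases, low ≠ PySem.Str.lower a) :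
    scanAliasesA aliases low canonical = none := by
  induction aliases with
  | nil => rfl
  | cons a rest ih =>
      rw [scanAliasesA, if_neg (h a (by simp))]
      exact ih (fun x hx => h x (by simp [hx]))

theorem scanTableA_eq_none (table : List (String × List String)) (low : String)
    (h : ∀ p ∈ table, low ≠ PySem.Str.lower p.1 ∧ ∀ a ∈ p.2, low ≠ PySem.Str.lower a) :
    scanTableA table low = none := by
  induction table with
  | nil => rfl
  | cons p rest ih =>
      obtain ⟨c, aliases⟩ := p
      rw [scanTableA, if_neg (h (c, aliases) (by simp)).1,
        scanAliasesA_eq_none _ _ _ (h (c, aliases) (by simp)).2]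
      exact ih (fun q hq => h q (by simp [hq]))

-- every lowercased name of the alias dict is a key of the literal table
theorem aliasKeys_mem : ∀ p ∈ indiaRoomAliases,
    PySem.Str.lower p.1 ∈ keyLits ∧ ∀ a ∈ p.2, PySem.Str.lower a ∈ keyLits := by decide

-- every first component of the literal table is one of its keys
theorem tableLit_keys : ∀ p ∈ tableLit, p.1 ∈ keyLits := by decide

-- binary search in the literal table agrees with A's nested scan on the keys themselves …
theorem lookup_eq_scan_of_mem : ∀ k ∈ keyLits,
    lookupIn tableLit k = scanTableA indiaRoomAliases k := by decide

-- … and both miss on every other string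
theorem lookup_eq_scan (k : String) :
    lookupIn tableLit k = scanTableA indiaRoomAliases k := by
  by_cases hk : k ∈ keyLits
  · exact lookup_eq_scan_of_mem k hk
  · rw [scanTableA_eq_none _ _ (fun p hp =>
      ⟨fun he => hk (by rw [he]; exact (aliasKeys_mem p hp).1),
       fun a ha he => hk (by rw [he]; exact (aliasKeys_mem p hp).2 a ha)⟩)]
    rw [lookupIn]
    split_ifs with hlo
    · cases hget : PySem.List.pyGet? tableLit
        (bsLoop tableLit k.toList tableLit.length 0 (tableLit.length : Int)) with
      | none => rfl
      | some p =>
          have hp : p ∈ tableLit := PySem.List.mem_of_pyGet?_eq_some _ hget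
          have hne : p.1 ≠ k := fun he => hk (by rw [← he]; exact tableLit_keys p hp)
          simp [hne]
    · rfl

-- ===== VERDICT (by name: the statement is the Claim_ definition above) =====
theorem normalize_room_label_spec : Claim_equal_normalize_room_label := by
  intro label _
  show normalize_room_label label = normalize_room_label_alt label
  rw [normalize_room_label, normalize_room_label_alt, tableB_eq, lookup_eq_scan]
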